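-- pv_equiv track=rewrite | github.com/steedev/galph | 21_Knuth-Morris-Pratt_algorithm/main.py | fi
-- ===== SOURCE A (Python) =====
-- def fi(w, s):
--     wd, sd = len(w), len(s)
--     for i in range(wd):
--         if s[0] == w[i] and wd-i-sd >= 0:
--             r = True
--             for j in range(1, sd):
--                 if w[i+j] != s[j]:
--                     r = False
--     return r
-- ===== SOURCE B (Python) =====
-- def fi(w, s):
--     # Last-candidate search: A's result is the full match test at the LAST
--     # index i with w[i] == s[0] and i <= len(w)-len(s); scan downward from
--     # that bound, compare the slice once.  (Return value only; raises like A
--     # where no candidate exists -- those inputs are outside Pre_.)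
--     wd, sd = len(w), len(s)
--     for i in range(wd - sd, -1, -1):
--         if w[i] == s[0]:
--             return w[i:i+sd] == s
--     raise ValueError("no candidate start position")
-- ===== Notes on version B (the rewrite author's own statement) =====
-- stated objective: faster
-- what changed: Instead of scanning every start position and re-running the full inner comparison at each candidate (keeping only the last result), B scans downward from len(w)-len(s) for the first (i.e. last) candidate start and does a single slice comparison there.
import Mathlib
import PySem

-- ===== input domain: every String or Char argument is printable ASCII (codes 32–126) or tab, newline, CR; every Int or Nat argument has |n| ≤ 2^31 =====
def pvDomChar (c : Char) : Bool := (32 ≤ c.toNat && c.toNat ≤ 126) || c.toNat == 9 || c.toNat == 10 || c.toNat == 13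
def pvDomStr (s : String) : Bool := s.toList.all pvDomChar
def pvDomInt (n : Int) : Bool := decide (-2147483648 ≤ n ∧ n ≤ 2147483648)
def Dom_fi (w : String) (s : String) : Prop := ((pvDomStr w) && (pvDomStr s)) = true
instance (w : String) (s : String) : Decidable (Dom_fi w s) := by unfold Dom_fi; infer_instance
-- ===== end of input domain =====

-- B replaces A's scan of every start position (with a full inner comparison at
-- each candidate, only the last surviving) by a single downward scan for the
-- last candidate start and ONE slice comparison there (objective: faster).
-- Return value only: where no candidate exists both Pythons raise (outside Pre_).

-- ===== PORT A =====
-- r is an unbound name until the first candidate: modelled as Option Bool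
-- starting at none; final `return r` with r unbound is a NameError, excluded by
-- Pre_fi (the port returns .getD false there).
def fi (w : String) (s : String) : Bool :=
  let wl := w.toList
  let sl := s.toList
  let wd := wl.length
  let sd := sl.length
  let r : Option Bool := (List.range wd).foldl (fun (r : Option Bool) (i : Nat) =>
    if PySem.List.pyGet? sl 0 = PySem.List.pyGet? wl (i : Int) ∧
        (wd : Int) - (i : Int) - (sd : Int) ≥ 0 then
      -- r = True; for j in range(1, sd): if w[i+j] != s[j]: r = False
      some ((List.range' 1 (sd - 1)).foldl (fun (rr : Bool) (j : Nat) =>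
        if PySem.List.pyGet? wl ((i : Int) + (j : Int)) ≠ PySem.List.pyGet? sl (j : Int)
        then false else rr) true)
    else r) none
  r.getD false

-- ===== PORT B =====
-- the loop `for i in range(wd - sd, -1, -1)`, descending; the final `raise`
-- (no candidate / empty range) is excluded by Pre_fi, the port returns false.
def fiAltLoop (wl sl : List Char) : Nat → Bool
  | 0 =>
    if wl[0]? = sl[0]? then
      (PySem.List.slice wl (some ((0 : Nat) : Int)) (some (((0 : Nat) : Int) + (sl.length : Int))) == sl)
    else false
  | (i+1) =>
    if wl[i+1]? = sl[0]? then
      (PySem.List.slice wl (some ((i+1 : Nat) : Int)) (some (((i+1 : Nat) : Int) + (sl.length : Int))) == sl)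
    else fiAltLoop wl sl i

def fi_alt (w : String) (s : String) : Bool :=
  let wl := w.toList
  let sl := s.toList
  if sl.length ≤ wl.length then fiAltLoop wl sl (wl.length - sl.length)
  else false

-- ===== PRECONDITION & SPEC =====
-- Pre_ excludes exactly the inputs on which A raises: s empty (IndexError at
-- s[0]) or no candidate start position (r unbound at `return r`, NameError).
def Pre_fi (w : String) (s : String) : Prop :=
  s.toList ≠ [] ∧ ∃ i ∈ List.range w.toList.length,
    w.toList[i]? = s.toList[0]? ∧ i + s.toList.length ≤ w.toList.length
instance (w : String) (s : String) : Decidable (Pre_fi w s) := by unfold Pre_fi; infer_instance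

def pvWitness_fi : String × String := ("abcab", "ab")

def Spec_fi (w : String) (s : String) (out : Bool) : Prop := out = fi_alt w s
instance (w : String) (s : String) (out : Bool) : Decidable (Spec_fi w s out) := by unfold Spec_fi; infer_instance

-- ===== CLAIM (what is proved, stated in full; the proofs are below) =====
def Claim_equal_fi : Prop := ∀ (w : String) (s : String), Dom_fi w s → Pre_fi w s → Spec_fi w s (fi w s)

-- ===== LEMMAS AND PROOFS =====

-- A's inner loop at start i
def innerA (wl sl : List Char) (i : Nat) : Bool :=
  (List.range' 1 (sl.length - 1)).foldl (fun (rr : Bool) (j : Nat) =>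
    if PySem.List.pyGet? wl ((i : Int) + (j : Int)) ≠ PySem.List.pyGet? sl (j : Int)
    then false else rr) true

-- A's outer loop after n iterations
def aRes (wl sl : List Char) : Nat → Option Bool
  | 0 => none
  | n+1 =>
    if PySem.List.pyGet? sl 0 = PySem.List.pyGet? wl (n : Int) ∧
        (wl.length : Int) - (n : Int) - (sl.length : Int) ≥ 0 then
      some (innerA wl sl n)
    else aRes wl sl n

lemma aRes_eq_foldl (wl sl : List Char) (n : Nat) :
    (List.range n).foldl (fun (r : Option Bool) (i : Nat) =>
      if PySem.List.pyGet? sl 0 = PySem.List.pyGet? wl (i : Int) ∧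
          (wl.length : Int) - (i : Int) - (sl.length : Int) ≥ 0 then
        some ((List.range' 1 (sl.length - 1)).foldl (fun (rr : Bool) (j : Nat) =>
          if PySem.List.pyGet? wl ((i : Int) + (j : Int)) ≠ PySem.List.pyGet? sl (j : Int)
          then false else rr) true)
      else r) none = aRes wl sl n := by
  induction n with
  | zero => rfl
  | succ n ih =>
    rw [List.range_succ, List.foldl_append, ih]
    simp only [List.foldl_cons, List.foldl_nil, aRes, innerA]

-- a fold that can only latch to false
lemma latch {α : Type} (P : α → Prop) [DecidablePred P] :
    ∀ (l : List α) (b : Bool),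
      l.foldl (fun rr j => if P j then false else rr) b
        = (b && l.all (fun j => !(decide (P j)))) := by
  intro l
  induction l with
  | nil => simp
  | cons j l ih =>
    intro b
    rw [List.foldl_cons, ih]
    by_cases h : P j
    · simp [h]
    · simp [h]

lemma good_iff (wl sl : List Char) (i : Nat) :
    (wl.drop i).take sl.length = sl ↔ ∀ j < sl.length, wl[i+j]? = sl[j]? := by
  constructor
  · intro h j hj
    have := congrArg (fun l => l[j]?) h
    simpa [List.getElem?_take, List.getElem?_drop, hj] using this
  · intro h
    apply List.ext_getElem?
    intro j
    by_cases hj : j < sl.length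
    · simpa [List.getElem?_take, List.getElem?_drop, hj] using h j hj
    · have h1 : ((wl.drop i).take sl.length)[j]? = none := by
        simp [hj]
      have h2 : sl[j]? = none := by
        rw [List.getElem?_eq_none_iff]; omega
      rw [h1, h2]

lemma cast_add_idx (i j : Nat) : (i : Int) + (j : Int) = ((i + j : Nat) : Int) := by
  push_cast; ring

lemma check_eq (wl sl : List Char) (i : Nat) (hs : sl ≠ [])
    (hg : wl[i]? = sl[0]?) :
    innerA wl sl i = ((wl.drop i).take sl.length == sl) := by
  have hsd : 1 ≤ sl.length := List.length_pos_iff.mpr hs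
  rw [innerA,
    latch (fun (j : Nat) => PySem.List.pyGet? wl ((i : Int) + (j : Int)) ≠ PySem.List.pyGet? sl (j : Int))]
  rw [Bool.eq_iff_iff]
  simp only [Bool.true_and, List.all_eq_true, List.mem_range'_1, Bool.not_eq_eq_eq_not,
    Bool.not_true, decide_eq_false_iff_not, Decidable.not_not, beq_iff_eq]
  rw [good_iff wl sl i]
  constructor
  · intro h j hj
    rcases Nat.eq_zero_or_pos j with h0 | h0
    · subst h0; simpa using hg
    · have hmem : 1 ≤ j ∧ j < 1 + (sl.length - 1) := by omega
      have := h j hmem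
      rw [cast_add_idx, PySem.List.pyGet?_natCast, PySem.List.pyGet?_natCast] at this
      exact this
  · intro h j hj
    obtain ⟨hj1, hj2⟩ := hj
    have := h j (by omega)
    rw [cast_add_idx, PySem.List.pyGet?_natCast, PySem.List.pyGet?_natCast]
    exact this

lemma cond_iff (wl sl : List Char) (i : Nat) (hle : i + sl.length ≤ wl.length) :
    (PySem.List.pyGet? sl 0 = PySem.List.pyGet? wl (i : Int) ∧
      (wl.length : Int) - (i : Int) - (sl.length : Int) ≥ 0) ↔ wl[i]? = sl[0]? := by
  rw [PySem.List.pyGet?_zero, PySem.List.pyGet?_natCast]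
  constructor
  · intro h; exact h.1.symm
  · intro h
    refine ⟨h.symm, ?_⟩
    omega

lemma key (wl sl : List Char) (hs : sl ≠ []) (hle : sl.length ≤ wl.length) :
    ∀ i, i ≤ wl.length - sl.length →
      (aRes wl sl (i+1)).getD false = fiAltLoop wl sl i := by
  intro i
  induction i with
  | zero =>
    intro _
    rw [show aRes wl sl 1 = if wl[0]? = sl[0]? then some (innerA wl sl 0) else none by
      simp only [aRes]
      rw [if_congr (cond_iff wl sl 0 (by omega)) rfl rfl]]
    by_cases hg : wl[0]? = sl[0]?
    · rw [if_pos hg, fiAltLoop, if_pos hg, Option.getD_some, check_eq wl sl 0 hs hg,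
        PySem.List.slice_natCast_add]
    · rw [if_neg hg, fiAltLoop, if_neg hg]
      rfl
  | succ i ih =>
    intro hi
    rw [show aRes wl sl (i+2)
        = if wl[i+1]? = sl[0]? then some (innerA wl sl (i+1)) else aRes wl sl (i+1) by
      simp only [aRes]
      rw [if_congr (cond_iff wl sl (i+1) (by omega)) rfl rfl]]
    by_cases hg : wl[i+1]? = sl[0]?
    · rw [if_pos hg, fiAltLoop, if_pos hg, Option.getD_some, check_eq wl sl (i+1) hs hg,
        PySem.List.slice_natCast_add]
    · rw [if_neg hg, fiAltLoop, if_neg hg]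
      exact ih (by omega)

lemma aRes_stable (wl sl : List Char) (hle : sl.length ≤ wl.length) :
    ∀ d, aRes wl sl (wl.length - sl.length + 1 + d) = aRes wl sl (wl.length - sl.length + 1) := by
  intro d
  induction d with
  | zero => rfl
  | succ d ih =>
    have hcond : ¬ (PySem.List.pyGet? sl 0
          = PySem.List.pyGet? wl ((wl.length - sl.length + 1 + d : Nat) : Int) ∧
        (wl.length : Int) - ((wl.length - sl.length + 1 + d : Nat) : Int) - (sl.length : Int) ≥ 0) := by
      intro h
      have h2 := h.2
      rw [show ((wl.length - sl.length + 1 + d : Nat) : Int)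
          = (wl.length : Int) - (sl.length : Int) + 1 + (d : Int) by push_cast [hle]; ring] at h2
      omega
    rw [show wl.length - sl.length + 1 + (d + 1) = (wl.length - sl.length + 1 + d) + 1 by omega]
    rw [show aRes wl sl ((wl.length - sl.length + 1 + d) + 1)
        = aRes wl sl (wl.length - sl.length + 1 + d) by
      simp only [aRes]
      rw [if_neg hcond]]
    exact ih

-- ===== VERDICT (by name: the statement is the Claim_ definition above) =====
theorem fi_spec : Claim_equal_fi := by
  intro w s _ hpre
  obtain ⟨hs, i, hi, hgi, hle'⟩ := hpre
  set wl := w.toList with hwl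
  set sl := s.toList with hsl
  have hsd : 1 ≤ sl.length := List.length_pos_iff.mpr hs
  have hle : sl.length ≤ wl.length := by omega
  show fi w s = fi_alt w s
  have hA : fi w s = (aRes wl sl wl.length).getD false := by
    rw [fi, ← hwl, ← hsl, aRes_eq_foldl]
  have hsplit : wl.length = wl.length - sl.length + 1 + (sl.length - 1) := by omega
  rw [hA, hsplit, aRes_stable wl sl hle,
    key wl sl hs hle (wl.length - sl.length) (le_refl _)]
  rw [fi_alt, ← hwl, ← hsl, if_pos hle]
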